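-- pv_equiv track=rewrite | github.com/seoyeonjin/algorithm-study-all | 프로그래머스/2/142085. 디펜스 게임/디펜스 게임.py | solution
-- ===== SOURCE A (Python) =====
-- import heapq
--
-- def solution(n, k, enemy):
--     heap = []
--
--     for i in range(len(enemy)):
--         e = enemy[i]
--
--         # 일단 병사로 막는다고 가정
--         n -= e
--
--         # 현재 라운드도 "무적권 후보"에 포함
--         heapq.heappush(heap, -e)
--
--         # 병사가 부족할 때
--         if n < 0:
--             if k == 0: # 더 이상 사용할 수 있는 무적권이 없으면
--                 return i
--             n += -heapq.heappop(heap) # 무적권 사용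
--             k -= 1
--
--     return len(enemy)
-- ===== SOURCE B (Python) =====
-- import heapq
--
-- def solution(n, k, enemy):
--     # Keep only the k largest enemies seen so far (the invincibility picks)
--     # in a size-k min-heap, and accumulate the soldier cost of everything
--     # else in `blocked`; fail at the first index where blocked exceeds n.
--     heap = []
--     blocked = 0
--     for i, e in enumerate(enemy):
--         if len(heap) < k:
--             heapq.heappush(heap, e)
--         elif k > 0 and e > heap[0]:
--             blocked += heapq.heappushpop(heap, e)
--         else:
--             blocked += e
--         if blocked > n:
--             return i
--     return len(enemy)
-- ===== Notes on version B (the rewrite author's own statement) =====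
-- stated objective: alternative
-- what changed: Instead of A's unbounded max-heap of all enemies with lazy popping when soldiers run out, B maintains a size-k min-heap of the current k largest enemies and a running blocked-cost sum, failing at the first index where that sum exceeds n.
-- outside the precondition, e.g. on solution(-2, 1, [0]): A returns 1, B returns 0; on solution(5, -1, [7, 7]): A returns 2, B returns 0; on solution(0, 2, [4, -1, 2, -2, 6]): A returns 4, B returns 5
import Mathlib
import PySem

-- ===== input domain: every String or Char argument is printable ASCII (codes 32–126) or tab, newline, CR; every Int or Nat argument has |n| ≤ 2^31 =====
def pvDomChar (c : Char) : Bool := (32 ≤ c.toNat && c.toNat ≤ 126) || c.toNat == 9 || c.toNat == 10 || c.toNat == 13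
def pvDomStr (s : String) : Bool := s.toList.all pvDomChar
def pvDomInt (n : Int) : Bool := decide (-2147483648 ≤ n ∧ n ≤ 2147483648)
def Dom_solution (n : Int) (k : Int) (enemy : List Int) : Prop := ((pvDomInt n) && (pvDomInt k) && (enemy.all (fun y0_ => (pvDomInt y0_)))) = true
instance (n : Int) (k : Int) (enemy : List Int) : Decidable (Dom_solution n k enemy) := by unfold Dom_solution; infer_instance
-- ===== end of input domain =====

-- B replaces A's unbounded max-heap with lazy popping by a size-k min-heap of the k largest
-- enemies plus a running blocked-cost sum; return values proved equal on Pre_ (the natural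
-- nonnegative domain plus the degenerate regions listed there).

-- ===== PORT A =====
-- A's heapq max-heap of negated enemies, ported by its multiset semantics: heappush = cons,
-- heappop = first minimum (exact: only the popped VALUE is used, the minimum of the multiset).
def solutionGoA : List Int → Int → Int → Int → List Int → Int
  | [], i, _, _, _ => i
  | e :: rest, i, n, k, heap =>
    let n1 := n - e
    let heap1 := (-e) :: heap
    if n1 < 0 then
      if k = 0 then i
      else
        match PySem.List.min? heap1 (fun x => x) with
        | none => i  -- unreachable: heap1 is nonempty
        | some m => solutionGoA rest (i + 1) (n1 + (-m)) (k - 1) (heap1.erase m)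
    else solutionGoA rest (i + 1) n1 k heap1

def solution (n : Int) (k : Int) (enemy : List Int) : Int :=
  solutionGoA enemy 0 n k []

-- ===== PORT B =====
-- B's size-k heapq min-heap ported as an ascending sorted list: heap[0] = head (the minimum),
-- heappush = ordered insert, heappushpop (run only when e > heap[0]) = drop the head and insert e.
-- Exact for every heap value B's code observes.
def solutionGoB : List Int → Int → Int → Int → List Int → Int → Int
  | [], i, _, _, _, _ => i
  | e :: rest, i, n, k, heap, blocked =>
    let st :=
      if (heap.length : Int) < k then (heap.orderedInsert (· ≤ ·) e, blocked)
      else if 0 < k ∧ heap.headD 0 < e then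
        (heap.tail.orderedInsert (· ≤ ·) e, blocked + heap.headD 0)
      else (heap, blocked + e)
    if st.2 > n then i else solutionGoB rest (i + 1) n k st.1 st.2

def solution_alt (n : Int) (k : Int) (enemy : List Int) : Int :=
  solutionGoB enemy 0 n k [] 0

-- ===== PRECONDITION & SPEC =====
-- Pre_ covers the problem's natural domain (soldiers n ≥ 0, invincibility count k ≥ 0, enemy
-- counts ≥ 0) plus the degenerate regions k = 0, empty enemy, n at least the sum of positive enemies,
-- and n ≥ 0 with at least as many invincibilities as positive enemies, where the values agree
-- for any signs; on the remaining negative inputs A returns accidental values of its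
-- lazy-popping loop that B's top-k greedy does not reproduce.
def Pre_solution (n : Int) (k : Int) (enemy : List Int) : Prop :=
  (0 ≤ n ∧ 0 ≤ k ∧ ∀ e ∈ enemy, 0 ≤ e) ∨ k = 0 ∨ enemy = [] ∨
    (enemy.map (fun e => max e 0)).sum ≤ n ∨
    (0 ≤ n ∧ ((Multiset.countP (fun x => 0 < x) (↑enemy : Multiset Int) : Nat) : Int) ≤ k)
instance (n : Int) (k : Int) (enemy : List Int) : Decidable (Pre_solution n k enemy) := by
  unfold Pre_solution; infer_instance
def pvWitness_solution : Int × Int × List Int := (10, 2, [4, 2, 4, 5, 3])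

def Spec_solution (n : Int) (k : Int) (enemy : List Int) (out : Int) : Prop := out = solution_alt n k enemy
instance (n : Int) (k : Int) (enemy : List Int) (out : Int) : Decidable (Spec_solution n k enemy out) := by unfold Spec_solution; infer_instance

-- ===== CLAIM (what is proved, stated in full; the proofs are below) =====
def Claim_equal_solution : Prop := ∀ (n : Int) (k : Int) (enemy : List Int), Dom_solution n k enemy → Pre_solution n k enemy → Spec_solution n k enemy (solution n k enemy)

-- ===== LEMMAS AND PROOFS =====

-- The multiset of actual enemy values held in A's (negated) heap list.
def negMS (Ha : List Int) : Multiset Int := ↑(Ha.map (fun x => -x))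

-- Coupling invariant between A's state (nA, kA, Ha) and B's state (T, blocked) after the same
-- prefix, through the multiset P of values A has spent invincibilities on.
structure StInv (n0 k0 nA kA blocked : Int) (Ha T : List Int) (P : Multiset Int) : Prop where
  sortedT : List.Pairwise (· ≤ ·) T
  Tsub : (↑T : Multiset Int) ≤ P + negMS Ha
  Tcard : (T.length : Int) = min k0 ((P + negMS Ha).card : Int)
  top : ∀ x ∈ (P + negMS Ha) - (↑T : Multiset Int), ∀ t ∈ T, x ≤ t
  Psub : P ≤ (↑T : Multiset Int)
  hblocked : blocked = (P + negMS Ha).sum - (↑T : Multiset Int).sum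
  hnA : nA = n0 - (P + negMS Ha).sum + P.sum
  nA0 : 0 ≤ nA
  hlt : ∀ x ∈ P, nA < x
  hHP : ∀ h ∈ negMS Ha, ∀ x ∈ P, h ≤ x
  hkA : kA = k0 - (P.card : Int)
  kA0 : 0 ≤ kA
  pos : ∀ x ∈ P + negMS Ha, 0 ≤ x

lemma negMS_cons (e : Int) (Ha : List Int) : negMS ((-e) :: Ha) = e ::ₘ negMS Ha := by
  simp [negMS]

lemma sub_sum_of_le {s t : Multiset Int} (h : s ≤ t) : (t - s).sum = t.sum - s.sum := by
  have := tsub_add_cancel_of_le h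
  have hs := congrArg Multiset.sum this
  rw [Multiset.sum_add] at hs
  omega

lemma sub_card_of_le {s t : Multiset Int} (h : s ≤ t) : (t - s).card = t.card - s.card := by
  have := tsub_add_cancel_of_le h
  have hs := congrArg Multiset.card this
  rw [Multiset.card_add] at hs
  omega

lemma add_singleton_le {s t : Multiset Int} (h : s ≤ t) {a : Int} (ha : a ∈ t - s) :
    s + {a} ≤ t := by
  rw [Multiset.le_iff_count] at h ⊢
  intro x
  have hc := h x
  have ha' : 0 < Multiset.count a (t - s) := Multiset.count_pos.mpr ha
  rw [Multiset.count_sub] at ha'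
  rw [Multiset.count_add, Multiset.count_singleton]
  by_cases hx : x = a
  · subst hx; rw [if_pos rfl]; omega
  · rw [if_neg hx]; omega

lemma le_of_le_cons_notMem {s t : Multiset Int} {a : Int} (h : s ≤ a ::ₘ t) (ha : a ∉ s) :
    s ≤ t := by
  rw [Multiset.le_iff_count] at h ⊢
  intro x
  have hc := h x
  rw [Multiset.count_cons] at hc
  by_cases hx : x = a
  · subst hx
    have h0 : Multiset.count x s = 0 := Multiset.count_eq_zero.mpr ha
    omega
  · rw [if_neg hx] at hc
    omega

lemma cons_sub_cons (a : Int) (s t : Multiset Int) : (a ::ₘ s) - (a ::ₘ t) = s - t := by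
  ext x
  rw [Multiset.count_sub, Multiset.count_cons, Multiset.count_cons, Multiset.count_sub]
  split_ifs <;> omega

lemma add_cons_sub (e : Int) {s t : Multiset Int} (h : t ≤ s) :
    (e ::ₘ s) - t = e ::ₘ (s - t) := by
  rw [Multiset.le_iff_count] at h
  ext x
  have := h x
  rw [Multiset.count_cons, Multiset.count_sub, Multiset.count_cons, Multiset.count_sub]
  split_ifs <;> omega

-- The derived facts used for both death- and survival-branches.
lemma StInv.blocked_le {n0 k0 nA kA blocked : Int} {Ha T : List Int} {P : Multiset Int}
    (inv : StInv n0 k0 nA kA blocked Ha T P) : blocked + nA ≤ n0 := by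
  have hsub : ((↑T : Multiset Int) - P).sum = (↑T : Multiset Int).sum - P.sum :=
    sub_sum_of_le inv.Psub
  have hpos : 0 ≤ ((↑T : Multiset Int) - P).sum := by
    apply Multiset.sum_nonneg
    intro x hx
    have hxT : x ∈ (↑T : Multiset Int) := Multiset.mem_of_le (Multiset.sub_le_self _ _) hx
    exact inv.pos x (Multiset.mem_of_le inv.Tsub hxT)
  have := inv.hblocked
  have := inv.hnA
  omega

-- List/Multiset bridges for the two heap representations.
lemma coe_orderedInsert (e : Int) (l : List Int) :
    ((l.orderedInsert (· ≤ ·) e : List Int) : Multiset Int) = e ::ₘ ↑l :=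
  Quot.sound (List.perm_orderedInsert (· ≤ ·) e l)

lemma negMS_erase (m : Int) (l : List Int) : negMS (l.erase m) = (negMS l).erase (-m) := by
  unfold negMS
  have hinj : Function.Injective (fun x : Int => -x) := by intro a b h; simpa using h
  have h1 : ((l.erase m).map (fun x : Int => -x)) = (l.map (fun x : Int => -x)).erase (-m) := by
    simpa using List.map_erase hinj (a := m) l
  rw [h1, ← Multiset.coe_erase]

lemma p_cons (e : Int) (Ha : List Int) (P : Multiset Int) :
    P + negMS ((-e) :: Ha) = e ::ₘ (P + negMS Ha) := by
  rw [negMS_cons]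
  ext x
  rw [Multiset.count_add, Multiset.count_cons, Multiset.count_cons, Multiset.count_add]
  split_ifs <;> omega

lemma pop_p {H1 : Multiset Int} (P : Multiset Int) {m' : Int} (hm : m' ∈ H1) :
    (m' ::ₘ P) + H1.erase m' = P + H1 := by
  ext x
  by_cases hx : x = m'
  · subst hx
    have := Multiset.count_pos.mpr hm
    rw [Multiset.count_add, Multiset.count_cons_self, Multiset.count_add,
      Multiset.count_erase_self]
    omega
  · rw [Multiset.count_add, Multiset.count_cons_of_ne hx, Multiset.count_add,
      Multiset.count_erase_of_ne hx]

lemma sub_cons_right {p T1 : Multiset Int} {t0 : Int} (h : t0 ::ₘ T1 ≤ p) :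
    p - T1 = t0 ::ₘ (p - (t0 ::ₘ T1)) := by
  rw [Multiset.le_iff_count] at h
  ext x
  have hx0 := h x
  by_cases hx : x = t0
  · subst hx
    rw [Multiset.count_cons_self] at hx0
    simp only [Multiset.count_sub, Multiset.count_cons_self]
    omega
  · rw [Multiset.count_cons_of_ne hx] at hx0
    simp only [Multiset.count_sub, Multiset.count_cons_of_ne hx]

-- facts about A's heappop (which pops the minimum of the negated values = minus the maximum)
lemma min?_neg_mem {l : List Int} {m : Int} (hm : PySem.List.min? l (fun x => x) = some m) :
    (-m) ∈ negMS l := by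
  have h := PySem.List.min?_mem hm
  unfold negMS
  simp only [Multiset.mem_coe, List.mem_map]
  exact ⟨m, h, rfl⟩

lemma min?_neg_top {l : List Int} {m : Int} (hm : PySem.List.min? l (fun x => x) = some m) :
    ∀ h ∈ negMS l, h ≤ -m := by
  intro h hh
  unfold negMS at hh
  simp only [Multiset.mem_coe, List.mem_map] at hh
  obtain ⟨y, hy, rfl⟩ := hh
  have := PySem.List.min?_isMin hm y hy
  simpa using this

-- shape facts derived from the invariant's cardinality equation
lemma small_T {n0 k0 nA kA blocked : Int} {Ha T : List Int} {P : Multiset Int}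
    (inv : StInv n0 k0 nA kA blocked Ha T P) (hlen : (T.length : Int) < k0) :
    (↑T : Multiset Int) = P + negMS Ha := by
  apply Multiset.eq_of_le_of_card_le inv.Tsub
  have h := inv.Tcard
  rcases min_cases k0 (((P + negMS Ha).card : Int)) with ⟨h1, h2⟩ | ⟨h1, h2⟩ <;>
    · simp only [Multiset.coe_card]; omega

lemma full_T {n0 k0 nA kA blocked : Int} {Ha T : List Int} {P : Multiset Int}
    (inv : StInv n0 k0 nA kA blocked Ha T P) (hlen : ¬ (T.length : Int) < k0) :
    (T.length : Int) = k0 ∧ k0 ≤ (((P + negMS Ha).card : Int)) := by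
  have h := inv.Tcard
  rcases min_cases k0 (((P + negMS Ha).card : Int)) with ⟨h1, h2⟩ | ⟨h1, h2⟩ <;> omega

-- with a full heap and at least one invincibility left, the popped multiset P fits inside T's tail
lemma P_le_T1 {n0 k0 nA kA blocked : Int} {Ha : List Int} {t0 : Int} {T1 : List Int}
    {P : Multiset Int} (inv : StInv n0 k0 nA kA blocked Ha (t0 :: T1) P)
    (hcard : (P.card : Int) < ((t0 :: T1).length : Int)) : P ≤ ↑T1 := by
  have hPsub := inv.Psub
  have hTm : ((t0 :: T1 : List Int) : Multiset Int) = t0 ::ₘ ↑T1 := by simp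
  by_cases ht0P : t0 ∈ P
  · -- every element of T − P is squeezed between t0 and min P = t0
    have hsub : (↑(t0 :: T1) : Multiset Int) - P ≤ negMS Ha := by
      rw [tsub_le_iff_left]
      exact inv.Tsub
    have hne : ((↑(t0 :: T1) : Multiset Int) - P) ≠ 0 := by
      have hc := sub_card_of_le inv.Psub
      intro h0
      rw [h0] at hc
      simp only [Multiset.card_zero, Multiset.coe_card] at hc
      omega
    obtain ⟨u, hu⟩ := Multiset.exists_mem_of_ne_zero hne
    have huH : u ∈ negMS Ha := Multiset.mem_of_le hsub hu
    have hule : u ≤ t0 := inv.hHP u huH t0 ht0P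
    have huT : u ∈ (↑(t0 :: T1) : Multiset Int) :=
      Multiset.mem_of_le (Multiset.sub_le_self _ _) hu
    have ht0u : t0 ≤ u := by
      rcases List.mem_cons.mp (Multiset.mem_coe.mp huT) with h | h
      · omega
      · exact (List.pairwise_cons.mp inv.sortedT).1 u (by simpa using h)
    have huev : u = t0 := le_antisymm hule ht0u
    subst huev
    have hcnt : Multiset.count u P < Multiset.count u (↑(u :: T1) : Multiset Int) := by
      have := Multiset.count_pos.mpr hu
      rw [Multiset.count_sub] at this
      omega
    rw [Multiset.le_iff_count]
    intro x
    have hx := (Multiset.le_iff_count.mp hPsub) x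
    by_cases hxu : x = u
    · subst hxu
      rw [hTm, Multiset.count_cons_self] at hcnt
      omega
    · rw [hTm, Multiset.count_cons_of_ne hxu] at hx
      exact hx
  · exact le_of_le_cons_notMem (by rwa [hTm] at hPsub) ht0P

-- shared facts for A's pop step (m is the heap minimum, -m the popped enemy value)
lemma pop_hlt {n0 k0 nA kA blocked e m : Int} {Ha T : List Int} {P : Multiset Int}
    (inv : StInv n0 k0 nA kA blocked Ha T P) (hdef : nA - e < 0)
    (hm : PySem.List.min? ((-e) :: Ha) (fun x => x) = some m) :
    ∀ x ∈ (-m) ::ₘ P, nA - e - m < x := by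
  have htopm := min?_neg_top hm
  have hem : e ≤ -m := htopm e (by rw [negMS_cons]; exact Multiset.mem_cons_self e _)
  have hmP : -m = e ∨ (-m) ∈ negMS Ha := by
    have h := min?_neg_mem hm
    rw [negMS_cons] at h
    exact Multiset.mem_cons.mp h
  intro x hx
  rcases Multiset.mem_cons.mp hx with rfl | hx'
  · omega
  · rcases hmP with h | h
    · have := inv.hlt x hx'; omega
    · have h1 := inv.hHP (-m) h x hx'; omega

lemma pop_hHP {n0 k0 nA kA blocked e m : Int} {Ha T : List Int} {P : Multiset Int}
    (inv : StInv n0 k0 nA kA blocked Ha T P)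
    (hm : PySem.List.min? ((-e) :: Ha) (fun x => x) = some m) :
    ∀ h ∈ negMS (((-e) :: Ha).erase m), ∀ x ∈ (-m) ::ₘ P, h ≤ x := by
  have htopm := min?_neg_top hm
  have hem : e ≤ -m := htopm e (by rw [negMS_cons]; exact Multiset.mem_cons_self e _)
  have hner := negMS_erase m ((-e) :: Ha)
  intro h hh x hx
  have hhH1 : h ∈ negMS ((-e) :: Ha) := by
    rw [hner] at hh; exact Multiset.mem_of_mem_erase hh
  have hhm : h ≤ -m := htopm h hhH1
  rcases Multiset.mem_cons.mp hx with rfl | hx'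
  · exact hhm
  · by_cases hme : -m = e
    · rw [hner, negMS_cons, hme, Multiset.erase_cons_head] at hh
      exact inv.hHP h hh x hx'
    · have hmH : (-m) ∈ negMS Ha := by
        have h2 := min?_neg_mem hm
        rw [negMS_cons] at h2
        rcases Multiset.mem_cons.mp h2 with h3 | h3
        · exact absurd h3 hme
        · exact h3
      have hmx : -m ≤ x := inv.hHP (-m) hmH x hx'
      omega

-- A survives the round, B's heap is not yet full: B pushes e.
lemma stepPush {n0 k0 nA kA blocked e : Int} {Ha T : List Int} {P : Multiset Int}
    (inv : StInv n0 k0 nA kA blocked Ha T P) (hdef : ¬ nA - e < 0)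
    (hlen : (T.length : Int) < k0) (he : 0 ≤ e) :
    StInv n0 k0 (nA - e) kA blocked ((-e) :: Ha) (T.orderedInsert (· ≤ ·) e) P := by
  have hTp := small_T inv hlen
  have hco := coe_orderedInsert e T
  have hpc := p_cons e Ha P
  have hcard : (((P + negMS Ha).card : Nat) : Int) = (T.length : Int) := by
    rw [← hTp]; simp
  have hnA0 := inv.nA0
  refine ⟨List.Pairwise.orderedInsert e T inv.sortedT, ?_, ?_, ?_, ?_, ?_, ?_, by omega,
    ?_, ?_, inv.hkA, inv.kA0, ?_⟩
  · rw [hco, hpc, hTp]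
  · rw [List.orderedInsert_length, hpc]
    simp only [Multiset.card_cons]
    push_cast
    omega
  · rw [hco, hpc, hTp]
    intro x hx
    rw [tsub_self] at hx
    simp at hx
  · exact inv.Psub.trans (by rw [hco]; exact Multiset.le_cons_self _ _)
  · rw [hco, hpc]
    simp only [Multiset.sum_cons]
    have hb := inv.hblocked
    omega
  · rw [hpc]
    simp only [Multiset.sum_cons]
    have := inv.hnA
    omega
  · intro x hx; have := inv.hlt x hx; omega
  · rw [negMS_cons]
    intro h hh x hx
    rcases Multiset.mem_cons.mp hh with rfl | hh'
    · have := inv.hlt x hx; omega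
    · exact inv.hHP h hh' x hx
  · rw [hpc]
    intro x hx
    rcases Multiset.mem_cons.mp hx with rfl | hx'
    · exact he
    · exact inv.pos x hx'

-- A survives the round, B's heap is full and e beats its minimum: B evicts the head.
lemma stepPushPop {n0 k0 nA kA blocked e t0 : Int} {Ha T1 : List Int} {P : Multiset Int}
    (inv : StInv n0 k0 nA kA blocked Ha (t0 :: T1) P) (hdef : ¬ nA - e < 0)
    (hlen : ¬ ((t0 :: T1).length : Int) < k0) (ht0e : t0 < e) (he : 0 ≤ e) :
    StInv n0 k0 (nA - e) kA (blocked + t0) ((-e) :: Ha) (T1.orderedInsert (· ≤ ·) e) P := by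
  obtain ⟨hlenk, hkcard⟩ := full_T inv hlen
  have ht0 : ∀ t ∈ T1, t0 ≤ t := (List.pairwise_cons.mp inv.sortedT).1
  have hTm : ((t0 :: T1 : List Int) : Multiset Int) = t0 ::ₘ ↑T1 := by simp
  have ht0P : t0 ∉ P := by
    intro hmem
    have := inv.hlt t0 hmem
    omega
  have hPT1 : P ≤ ↑T1 := le_of_le_cons_notMem (by rw [← hTm]; exact inv.Psub) ht0P
  have hT1p : (↑T1 : Multiset Int) ≤ P + negMS Ha := by
    refine le_trans ?_ inv.Tsub
    rw [hTm]
    exact Multiset.le_cons_self _ _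
  have hco := coe_orderedInsert e T1
  have hpc := p_cons e Ha P
  have hsub1 : (P + negMS ((-e) :: Ha)) - ↑(T1.orderedInsert (· ≤ ·) e)
      = t0 ::ₘ ((P + negMS Ha) - ↑(t0 :: T1)) := by
    rw [hco, hpc, cons_sub_cons, hTm]
    exact sub_cons_right (by rw [← hTm]; exact inv.Tsub)
  have hnA0 := inv.nA0
  refine ⟨List.Pairwise.orderedInsert e T1 (List.pairwise_cons.mp inv.sortedT).2,
    ?_, ?_, ?_, ?_, ?_, ?_, by omega, ?_, ?_, inv.hkA, inv.kA0, ?_⟩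
  · rw [hco, hpc]
    exact Multiset.cons_le_cons e hT1p
  · rw [List.orderedInsert_length, hpc]
    simp only [Multiset.card_cons]
    simp only [List.length_cons] at hlenk
    push_cast
    push_cast at hlenk
    omega
  · rw [hsub1]
    intro x hx t ht
    rcases (List.mem_orderedInsert _).mp ht with rfl | htT1
    · rcases Multiset.mem_cons.mp hx with rfl | hx'
      · omega
      · have := inv.top x hx' t0 (by simp); omega
    · rcases Multiset.mem_cons.mp hx with rfl | hx'
      · exact ht0 t htT1
      · exact inv.top x hx' t (by simp [htT1])
  · rw [hco]
    exact hPT1.trans (Multiset.le_cons_self _ _)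
  · rw [hco, hpc]
    simp only [Multiset.sum_cons]
    have hb := inv.hblocked
    rw [hTm, Multiset.sum_cons] at hb
    omega
  · rw [hpc]
    simp only [Multiset.sum_cons]
    have := inv.hnA
    omega
  · intro x hx; have := inv.hlt x hx; omega
  · rw [negMS_cons]
    intro h hh x hx
    rcases Multiset.mem_cons.mp hh with rfl | hh'
    · have := inv.hlt x hx; omega
    · exact inv.hHP h hh' x hx
  · rw [hpc]
    intro x hx
    rcases Multiset.mem_cons.mp hx with rfl | hx'
    · exact he
    · exact inv.pos x hx'

-- A survives the round, B's heap is full and e does not beat its minimum: B pays e.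
lemma stepAdd {n0 k0 nA kA blocked e : Int} {Ha T : List Int} {P : Multiset Int}
    (inv : StInv n0 k0 nA kA blocked Ha T P) (hdef : ¬ nA - e < 0)
    (hlen : ¬ (T.length : Int) < k0) (het : ∀ t ∈ T, e ≤ t) (he : 0 ≤ e) :
    StInv n0 k0 (nA - e) kA (blocked + e) ((-e) :: Ha) T P := by
  obtain ⟨hlenk, hkcard⟩ := full_T inv hlen
  have hpc := p_cons e Ha P
  have hsub : (P + negMS ((-e) :: Ha)) - ↑T = e ::ₘ ((P + negMS Ha) - ↑T) := by
    rw [hpc]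
    exact add_cons_sub e inv.Tsub
  have hnA0 := inv.nA0
  refine ⟨inv.sortedT, ?_, ?_, ?_, inv.Psub, ?_, ?_, by omega, ?_, ?_, inv.hkA, inv.kA0, ?_⟩
  · exact inv.Tsub.trans (by rw [hpc]; exact Multiset.le_cons_self _ _)
  · rw [hpc]
    simp only [Multiset.card_cons]
    push_cast
    omega
  · rw [hsub]
    intro x hx t ht
    rcases Multiset.mem_cons.mp hx with rfl | hx'
    · exact het t ht
    · exact inv.top x hx' t ht
  · rw [hpc]
    simp only [Multiset.sum_cons]
    have := inv.hblocked
    omega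
  · rw [hpc]
    simp only [Multiset.sum_cons]
    have := inv.hnA
    omega
  · intro x hx; have := inv.hlt x hx; omega
  · rw [negMS_cons]
    intro h hh x hx
    rcases Multiset.mem_cons.mp hh with rfl | hh'
    · have := inv.hlt x hx; omega
    · exact inv.hHP h hh' x hx
  · rw [hpc]
    intro x hx
    rcases Multiset.mem_cons.mp hx with rfl | hx'
    · exact he
    · exact inv.pos x hx'

-- A pops (-m), B's heap is not yet full: B pushes e.
lemma stepPopPush {n0 k0 nA kA blocked e m : Int} {Ha T : List Int} {P : Multiset Int}
    (inv : StInv n0 k0 nA kA blocked Ha T P) (hdef : nA - e < 0) (hkne : kA ≠ 0)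
    (hm : PySem.List.min? ((-e) :: Ha) (fun x => x) = some m)
    (hlen : (T.length : Int) < k0) (he : 0 ≤ e) :
    StInv n0 k0 (nA - e - m) (kA - 1) blocked (((-e) :: Ha).erase m)
      (T.orderedInsert (· ≤ ·) e) ((-m) ::ₘ P) := by
  have hmem := min?_neg_mem hm
  have htopm := min?_neg_top hm
  have hner := negMS_erase m ((-e) :: Ha)
  have hp' : ((-m) ::ₘ P) + negMS (((-e) :: Ha).erase m) = P + negMS ((-e) :: Ha) := by
    rw [hner]; exact pop_p P hmem
  have hpc := p_cons e Ha P
  have hTp := small_T inv hlen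
  have hco := coe_orderedInsert e T
  have hem : e ≤ -m := htopm e (by rw [negMS_cons]; exact Multiset.mem_cons_self e _)
  have hkA1 : 1 ≤ kA := by have := inv.kA0; omega
  have hcard : (((P + negMS Ha).card : Nat) : Int) = (T.length : Int) := by
    rw [← hTp]; simp
  have hnA0 := inv.nA0
  refine ⟨List.Pairwise.orderedInsert e T inv.sortedT, ?_, ?_, ?_, ?_, ?_, ?_, by omega,
    pop_hlt inv hdef hm, pop_hHP inv hm, ?_, by omega, ?_⟩
  · rw [hco, hp', hpc, hTp]
  · rw [List.orderedInsert_length, hp', hpc]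
    simp only [Multiset.card_cons]
    push_cast
    omega
  · rw [hco, hp', hpc, hTp]
    intro x hx
    rw [tsub_self] at hx
    simp at hx
  · calc ((-m) ::ₘ P : Multiset Int) ≤ ((-m) ::ₘ P) + negMS (((-e) :: Ha).erase m) :=
        Multiset.le_add_right _ _
    _ = e ::ₘ (P + negMS Ha) := by rw [hp', hpc]
    _ = ↑(T.orderedInsert (· ≤ ·) e) := by rw [hco, hTp]
  · rw [hco, hp', hpc, hTp]
    simp only [Multiset.sum_cons]
    have hb := inv.hblocked
    rw [hTp] at hb
    omega
  · rw [hp', hpc]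
    simp only [Multiset.sum_cons]
    have := inv.hnA
    omega
  · have := inv.hkA
    simp only [Multiset.card_cons]
    push_cast
    omega
  · rw [hp', hpc]
    intro x hx
    rcases Multiset.mem_cons.mp hx with rfl | hx'
    · exact he
    · exact inv.pos x hx'

-- A pops (-m), B's heap is full and e beats its minimum: B evicts the head.
lemma stepPopPushPop {n0 k0 nA kA blocked e m t0 : Int} {Ha T1 : List Int} {P : Multiset Int}
    (inv : StInv n0 k0 nA kA blocked Ha (t0 :: T1) P) (hdef : nA - e < 0) (hkne : kA ≠ 0)
    (hm : PySem.List.min? ((-e) :: Ha) (fun x => x) = some m)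
    (hlen : ¬ ((t0 :: T1).length : Int) < k0) (ht0e : t0 < e) (he : 0 ≤ e) :
    StInv n0 k0 (nA - e - m) (kA - 1) (blocked + t0) (((-e) :: Ha).erase m)
      (T1.orderedInsert (· ≤ ·) e) ((-m) ::ₘ P) := by
  obtain ⟨hlenk, hkcard⟩ := full_T inv hlen
  have hmem := min?_neg_mem hm
  have htopm := min?_neg_top hm
  have hner := negMS_erase m ((-e) :: Ha)
  have hp' : ((-m) ::ₘ P) + negMS (((-e) :: Ha).erase m) = P + negMS ((-e) :: Ha) := by
    rw [hner]; exact pop_p P hmem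
  have hpc := p_cons e Ha P
  have hco := coe_orderedInsert e T1
  have hem : e ≤ -m := htopm e (by rw [negMS_cons]; exact Multiset.mem_cons_self e _)
  have hkA1 : 1 ≤ kA := by have := inv.kA0; omega
  have ht0 : ∀ t ∈ T1, t0 ≤ t := (List.pairwise_cons.mp inv.sortedT).1
  have hTm : ((t0 :: T1 : List Int) : Multiset Int) = t0 ::ₘ ↑T1 := by simp
  have hmt0 : t0 < -m := by omega
  have hcardP : (P.card : Int) < ((t0 :: T1).length : Int) := by
    have h1 := inv.hkA
    omega
  have hPT1 : P ≤ ↑T1 := P_le_T1 inv hcardP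
  have hT1p : (↑T1 : Multiset Int) ≤ P + negMS Ha := by
    refine le_trans ?_ inv.Tsub
    rw [hTm]
    exact Multiset.le_cons_self _ _
  -- the popped value -m fits beside P inside the updated heap e ::ₘ T1
  have hPm : ((-m) ::ₘ P : Multiset Int) ≤ e ::ₘ ↑T1 := by
    by_cases hme : -m = e
    · rw [hme]; exact Multiset.cons_le_cons e hPT1
    · have hmH : (-m) ∈ negMS Ha := by
        have h2 := hmem
        rw [negMS_cons] at h2
        rcases Multiset.mem_cons.mp h2 with h3 | h3
        · exact absurd h3 hme
        · exact h3
      have hcp : Multiset.count (-m) P + 1 ≤ Multiset.count (-m) (P + negMS Ha) := by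
        rw [Multiset.count_add]
        have := Multiset.count_pos.mpr hmH
        omega
      have hnotout : (-m) ∉ (P + negMS Ha) - (↑(t0 :: T1) : Multiset Int) := by
        intro hmem2
        have := inv.top (-m) hmem2 t0 (by simp)
        omega
      have h0 : Multiset.count (-m) ((P + negMS Ha) - (↑(t0 :: T1) : Multiset Int)) = 0 :=
        Multiset.count_eq_zero.mpr hnotout
      rw [Multiset.count_sub] at h0
      have hcnt1 : Multiset.count (-m) P < Multiset.count (-m) (↑T1 : Multiset Int) := by
        have hx := hTm
        have h4 : Multiset.count (-m) (↑(t0 :: T1) : Multiset Int)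
            = Multiset.count (-m) (↑T1 : Multiset Int) := by
          rw [hTm, Multiset.count_cons_of_ne (by omega : (-m) ≠ t0)]
        omega
      have hstep : P + {-m} ≤ ↑T1 := by
        refine add_singleton_le hPT1 ?_
        apply Multiset.count_pos.mp
        rw [Multiset.count_sub]
        omega
      calc ((-m) ::ₘ P : Multiset Int) = P + {-m} := by
            rw [← Multiset.singleton_add, add_comm]
      _ ≤ ↑T1 := hstep
      _ ≤ e ::ₘ ↑T1 := Multiset.le_cons_self _ _
  have hsub1 : (((-m) ::ₘ P) + negMS (((-e) :: Ha).erase m)) - ↑(T1.orderedInsert (· ≤ ·) e)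
      = t0 ::ₘ ((P + negMS Ha) - ↑(t0 :: T1)) := by
    rw [hco, hp', hpc, cons_sub_cons, hTm]
    exact sub_cons_right (by rw [← hTm]; exact inv.Tsub)
  have hnA0 := inv.nA0
  refine ⟨List.Pairwise.orderedInsert e T1 (List.pairwise_cons.mp inv.sortedT).2,
    ?_, ?_, ?_, ?_, ?_, ?_, by omega, pop_hlt inv hdef hm, pop_hHP inv hm, ?_, by omega, ?_⟩
  · rw [hco, hp', hpc]
    exact Multiset.cons_le_cons e hT1p
  · rw [List.orderedInsert_length, hp', hpc]
    simp only [Multiset.card_cons]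
    simp only [List.length_cons] at hlenk
    push_cast
    push_cast at hlenk
    omega
  · rw [hsub1]
    intro x hx t ht
    rcases (List.mem_orderedInsert _).mp ht with rfl | htT1
    · rcases Multiset.mem_cons.mp hx with rfl | hx'
      · omega
      · have := inv.top x hx' t0 (by simp); omega
    · rcases Multiset.mem_cons.mp hx with rfl | hx'
      · exact ht0 t htT1
      · exact inv.top x hx' t (by simp [htT1])
  · rw [hco]
    exact hPm
  · rw [hco, hp', hpc]
    simp only [Multiset.sum_cons]
    have hb := inv.hblocked
    rw [hTm, Multiset.sum_cons] at hb
    omega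
  · rw [hp', hpc]
    simp only [Multiset.sum_cons]
    have := inv.hnA
    omega
  · have := inv.hkA
    simp only [Multiset.card_cons]
    push_cast
    omega
  · rw [hp', hpc]
    intro x hx
    rcases Multiset.mem_cons.mp hx with rfl | hx'
    · exact he
    · exact inv.pos x hx'

-- A pops (-m), B's heap is full and e does not beat its minimum: B pays e.
lemma stepPopAdd {n0 k0 nA kA blocked e m : Int} {Ha T : List Int} {P : Multiset Int}
    (inv : StInv n0 k0 nA kA blocked Ha T P) (hdef : nA - e < 0) (hkne : kA ≠ 0)
    (hm : PySem.List.min? ((-e) :: Ha) (fun x => x) = some m)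
    (hlen : ¬ (T.length : Int) < k0) (het : ∀ t ∈ T, e ≤ t) (he : 0 ≤ e) :
    StInv n0 k0 (nA - e - m) (kA - 1) (blocked + e) (((-e) :: Ha).erase m)
      T ((-m) ::ₘ P) := by
  obtain ⟨hlenk, hkcard⟩ := full_T inv hlen
  have hmem := min?_neg_mem hm
  have htopm := min?_neg_top hm
  have hner := negMS_erase m ((-e) :: Ha)
  have hp' : ((-m) ::ₘ P) + negMS (((-e) :: Ha).erase m) = P + negMS ((-e) :: Ha) := by
    rw [hner]; exact pop_p P hmem
  have hpc := p_cons e Ha P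
  have hem : e ≤ -m := htopm e (by rw [negMS_cons]; exact Multiset.mem_cons_self e _)
  have hkA1 : 1 ≤ kA := by have := inv.kA0; omega
  have hsub : ((((-m) ::ₘ P) + negMS (((-e) :: Ha).erase m)) : Multiset Int) - ↑T
      = e ::ₘ ((P + negMS Ha) - ↑T) := by
    rw [hp', hpc]
    exact add_cons_sub e inv.Tsub
  -- find the witness u showing -m sits in T − P
  have hTmP_sub : (↑T : Multiset Int) - P ≤ negMS Ha := by
    rw [tsub_le_iff_left]
    exact inv.Tsub
  have hne0 : ((↑T : Multiset Int) - P) ≠ 0 := by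
    intro h0
    have hc := sub_card_of_le inv.Psub
    rw [h0] at hc
    simp only [Multiset.card_zero, Multiset.coe_card] at hc
    have := inv.hkA
    omega
  obtain ⟨u, hu⟩ := Multiset.exists_mem_of_ne_zero hne0
  have huH : u ∈ negMS Ha := Multiset.mem_of_le hTmP_sub hu
  have huH1 : u ∈ negMS ((-e) :: Ha) := by
    rw [negMS_cons]; exact Multiset.mem_cons_of_mem huH
  have hum : u ≤ -m := htopm u huH1
  have huT : u ∈ (↑T : Multiset Int) := Multiset.mem_of_le (Multiset.sub_le_self _ _) hu
  have heu : e ≤ u := het u (Multiset.mem_coe.mp huT)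
  have hmmem : (-m) ∈ (↑T : Multiset Int) - P := by
    by_cases hme : -m = e
    · have hue : u = -m := le_antisymm hum (by omega)
      rwa [← hue]
    · have hmH : (-m) ∈ negMS Ha := by
        have h2 := hmem
        rw [negMS_cons] at h2
        rcases Multiset.mem_cons.mp h2 with h3 | h3
        · exact absurd h3 hme
        · exact h3
      have hcp : Multiset.count (-m) P + 1 ≤ Multiset.count (-m) (P + negMS Ha) := by
        rw [Multiset.count_add]
        have := Multiset.count_pos.mpr hmH
        omega
      by_cases hcnt : Multiset.count (-m) P < Multiset.count (-m) (↑T : Multiset Int)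
      · apply Multiset.count_pos.mp
        rw [Multiset.count_sub]
        omega
      · exfalso
        have hout : (-m) ∈ (P + negMS Ha) - (↑T : Multiset Int) := by
          apply Multiset.count_pos.mp
          rw [Multiset.count_sub]
          omega
        have h1 := inv.top (-m) hout u (Multiset.mem_coe.mp huT)
        have hue : u = -m := le_antisymm hum h1
        rw [hue] at hu
        have := Multiset.count_pos.mpr hu
        rw [Multiset.count_sub] at this
        omega
  have hPm : ((-m) ::ₘ P : Multiset Int) ≤ ↑T := by
    have hstep := add_singleton_le inv.Psub hmmem
    calc ((-m) ::ₘ P : Multiset Int) = P + {-m} := by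
          rw [← Multiset.singleton_add, add_comm]
    _ ≤ ↑T := hstep
  have hnA0 := inv.nA0
  refine ⟨inv.sortedT, ?_, ?_, ?_, hPm, ?_, ?_, by omega,
    pop_hlt inv hdef hm, pop_hHP inv hm, ?_, by omega, ?_⟩
  · exact inv.Tsub.trans (by rw [hp', hpc]; exact Multiset.le_cons_self _ _)
  · rw [hp', hpc]
    simp only [Multiset.card_cons]
    push_cast
    omega
  · rw [hsub]
    intro x hx t ht
    rcases Multiset.mem_cons.mp hx with rfl | hx'
    · exact het t ht
    · exact inv.top x hx' t ht
  · rw [hp', hpc]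
    simp only [Multiset.sum_cons]
    have := inv.hblocked
    omega
  · rw [hp', hpc]
    simp only [Multiset.sum_cons]
    have := inv.hnA
    omega
  · have := inv.hkA
    simp only [Multiset.card_cons]
    push_cast
    omega
  · rw [hp', hpc]
    intro x hx
    rcases Multiset.mem_cons.mp hx with rfl | hx'
    · exact he
    · exact inv.pos x hx'

-- when A's invincibilities are exhausted and a deficit occurs, B's blocked sum also overruns n0
lemma death_facts {n0 k0 nA kA blocked e : Int} {Ha T : List Int} {P : Multiset Int}
    (inv : StInv n0 k0 nA kA blocked Ha T P) (hdef : nA - e < 0) (hk : kA = 0) :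
    ¬ (T.length : Int) < k0 ∧ n0 < blocked + e ∧ (0 < k0 → n0 < blocked + T.headD 0) := by
  have hkA := inv.hkA
  have hcardle : P.card ≤ Multiset.card (↑T : Multiset Int) := Multiset.card_le_card inv.Psub
  have hTcard := inv.Tcard
  have hlenP : (T.length : Int) = (P.card : Int) ∧ ¬ (T.length : Int) < k0 := by
    simp only [Multiset.coe_card] at hcardle
    rcases min_cases k0 (((P + negMS Ha).card : Nat) : Int) with ⟨h1, h2⟩ | ⟨h1, h2⟩ <;>
      constructor <;> omega
  have hPT : P = (↑T : Multiset Int) := by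
    apply Multiset.eq_of_le_of_card_le inv.Psub
    simp only [Multiset.coe_card]
    omega
  have hsum : (↑T : Multiset Int).sum = P.sum := by rw [← hPT]
  have hb := inv.hblocked
  have hn := inv.hnA
  refine ⟨hlenP.2, by omega, ?_⟩
  intro hk0
  -- T is nonempty, and its head lies in P, hence exceeds nA
  cases T with
  | nil =>
    exfalso
    simp at hlenP
    omega
  | cons t0 T1 =>
    have ht0P : t0 ∈ P := by
      rw [hPT]
      simp
    have := inv.hlt t0 ht0P
    simp only [List.headD_cons]
    omega

-- Main coupled-induction lemma-- Main coupled-induction lemma: from any related pair of states the two loops agree.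
lemma goAB (rest : List Int) : ∀ (i n0 k0 nA kA blocked : Int) (Ha T : List Int) (P : Multiset Int),
    (∀ x ∈ rest, 0 ≤ x) → StInv n0 k0 nA kA blocked Ha T P →
    solutionGoA rest i nA kA Ha = solutionGoB rest i n0 k0 T blocked := by
  induction rest with
  | nil =>
    intro i n0 k0 nA kA blocked Ha T P _ _
    simp [solutionGoA, solutionGoB]
  | cons e rest ih =>
    intro i n0 k0 nA kA blocked Ha T P hrest inv
    have he : 0 ≤ e := hrest e (by simp)
    have hrest' : ∀ x ∈ rest, 0 ≤ x := fun x hx => hrest x (by simp [hx])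
    simp only [solutionGoA, solutionGoB]
    by_cases hdef : nA - e < 0
    · rw [if_pos hdef]
      by_cases hk : kA = 0
      · rw [if_pos hk]
        obtain ⟨hnl, hbe, hbh⟩ := death_facts inv hdef hk
        rw [if_neg hnl]
        by_cases hke : 0 < k0 ∧ T.headD 0 < e
        · rw [if_pos hke]
          dsimp only
          rw [if_pos (hbh hke.1)]
        · rw [if_neg hke]
          dsimp only
          rw [if_pos hbe]
      · rw [if_neg hk]
        obtain ⟨m, hm⟩ : ∃ m, PySem.List.min? ((-e) :: Ha) (fun x => x) = some m := by
          cases h : PySem.List.min? ((-e) :: Ha) (fun x => x) with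
          | none => exact absurd ((PySem.List.min?_eq_none_iff _ _).mp h) (by simp)
          | some m => exact ⟨m, rfl⟩
        rw [hm]
        by_cases hlen : (T.length : Int) < k0
        · have inv' := stepPopPush inv hdef hk hm hlen he
          have hsurv : ¬ blocked > n0 := by
            have h1 := inv'.blocked_le
            have h2 := inv'.nA0
            omega
          rw [if_pos hlen]
          dsimp only
          rw [if_neg hsurv]
          exact ih _ _ _ _ _ _ _ _ _ hrest' inv'
        · rw [if_neg hlen]
          have hlenk := (full_T inv hlen).1
          have hk0 : 0 < k0 := by
            have h1 := inv.hkA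
            have h2 := inv.kA0
            have h3 : (0 : Int) ≤ (P.card : Int) := by positivity
            omega
          obtain ⟨t0, T1, rfl⟩ : ∃ t0 T1, T = t0 :: T1 := by
            cases T with
            | nil => exfalso; simp at hlenk; omega
            | cons t0 T1 => exact ⟨t0, T1, rfl⟩
          by_cases hke : 0 < k0 ∧ (t0 :: T1).headD 0 < e
          · have ht0e : t0 < e := by simpa using hke.2
            have inv' := stepPopPushPop inv hdef hk hm hlen ht0e he
            have hsurv : ¬ blocked + t0 > n0 := by
              have h1 := inv'.blocked_le
              have h2 := inv'.nA0
              omega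
            rw [if_pos hke]
            simp only [List.headD_cons, List.tail_cons]
            rw [if_neg hsurv]
            exact ih _ _ _ _ _ _ _ _ _ hrest' inv'
          · have het : ∀ t ∈ (t0 :: T1), e ≤ t := by
              have hnot : ¬ t0 < e := fun h => hke ⟨hk0, by simpa using h⟩
              intro t ht
              rcases List.mem_cons.mp ht with rfl | ht1
              · omega
              · have := (List.pairwise_cons.mp inv.sortedT).1 t ht1
                omega
            have inv' := stepPopAdd inv hdef hk hm hlen het he
            have hsurv : ¬ blocked + e > n0 := by
              have h1 := inv'.blocked_le
              have h2 := inv'.nA0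
              omega
            rw [if_neg hke]
            dsimp only
            rw [if_neg hsurv]
            exact ih _ _ _ _ _ _ _ _ _ hrest' inv'
    · rw [if_neg hdef]
      by_cases hlen : (T.length : Int) < k0
      · have inv' := stepPush inv hdef hlen he
        have hsurv : ¬ blocked > n0 := by
          have h1 := inv'.blocked_le
          have h2 := inv'.nA0
          omega
        rw [if_pos hlen]
        dsimp only
        rw [if_neg hsurv]
        exact ih _ _ _ _ _ _ _ _ _ hrest' inv'
      · rw [if_neg hlen]
        have hlenk := (full_T inv hlen).1
        by_cases hke : 0 < k0 ∧ T.headD 0 < e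
        · obtain ⟨t0, T1, rfl⟩ : ∃ t0 T1, T = t0 :: T1 := by
            cases T with
            | nil => exfalso; simp at hlenk; omega
            | cons t0 T1 => exact ⟨t0, T1, rfl⟩
          have ht0e : t0 < e := by simpa using hke.2
          have inv' := stepPushPop inv hdef hlen ht0e he
          have hsurv : ¬ blocked + t0 > n0 := by
            have h1 := inv'.blocked_le
            have h2 := inv'.nA0
            omega
          rw [if_pos hke]
          simp only [List.headD_cons, List.tail_cons]
          rw [if_neg hsurv]
          exact ih _ _ _ _ _ _ _ _ _ hrest' inv'
        · have het : ∀ t ∈ T, e ≤ t := by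
            intro t ht
            cases T with
            | nil => simp at ht
            | cons t0 T1 =>
              have hk0 : 0 < k0 := by
                simp only [List.length_cons] at hlenk
                push_cast at hlenk
                omega
              have hnot : ¬ t0 < e := fun h => hke ⟨hk0, by simpa using h⟩
              rcases List.mem_cons.mp ht with rfl | ht1
              · omega
              · have := (List.pairwise_cons.mp inv.sortedT).1 t ht1
                omega
          have inv' := stepAdd inv hdef hlen het he
          have hsurv : ¬ blocked + e > n0 := by
            have h1 := inv'.blocked_le
            have h2 := inv'.nA0
            omega
          rw [if_neg hke]
          dsimp only
          rw [if_neg hsurv]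
          exact ih _ _ _ _ _ _ _ _ _ hrest' inv'

-- Degenerate case: n covers the sum of all positive enemies, so A never sees a deficit and
-- B's blocked sum can never pass n, for any k.
lemma goA_rich (rest : List Int) : ∀ (i nA kA : Int) (Ha : List Int),
    (rest.map (fun e => max e 0)).sum ≤ nA → solutionGoA rest i nA kA Ha = i + rest.length := by
  induction rest with
  | nil => intros; simp [solutionGoA]
  | cons e rest ih =>
    intro i nA kA Ha hn
    simp only [solutionGoA, List.length_cons, List.map_cons, List.sum_cons] at hn ⊢
    have hpos : (0:Int) ≤ (rest.map (fun e => max e 0)).sum := by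
      apply List.sum_nonneg
      intro x hx
      obtain ⟨y, _, rfl⟩ := List.mem_map.mp hx
      exact le_max_right y 0
    have hmax : e ≤ max e 0 := le_max_left e 0
    rw [if_neg (by omega : ¬ nA - e < 0), ih _ _ _ _ (by omega)]
    push_cast
    ring

lemma goB_rich (rest : List Int) : ∀ (i n0 k0 blocked : Int) (T : List Int),
    blocked + (rest.map (fun e => max e 0)).sum ≤ n0 →
    solutionGoB rest i n0 k0 T blocked = i + rest.length := by
  induction rest with
  | nil => intros; simp [solutionGoB]
  | cons e rest ih =>
    intro i n0 k0 blocked T hn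
    simp only [solutionGoB, List.length_cons, List.map_cons, List.sum_cons] at hn ⊢
    have hpos : (0:Int) ≤ (rest.map (fun e => max e 0)).sum := by
      apply List.sum_nonneg
      intro x hx
      obtain ⟨y, _, rfl⟩ := List.mem_map.mp hx
      exact le_max_right y 0
    have hmax : e ≤ max e 0 := le_max_left e 0
    have hmax0 : (0:Int) ≤ max e 0 := le_max_right e 0
    by_cases hlen : (T.length : Int) < k0
    · rw [if_pos hlen]
      dsimp only
      rw [if_neg (by omega : ¬ blocked > n0), ih _ _ _ _ _ (by omega)]
      push_cast
      ring
    · rw [if_neg hlen]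
      by_cases hke : 0 < k0 ∧ T.headD 0 < e
      · rw [if_pos hke]
        dsimp only
        have ht0 : T.headD 0 ≤ max e 0 := by have := hke.2; omega
        rw [if_neg (by omega : ¬ blocked + T.headD 0 > n0), ih _ _ _ _ _ (by omega)]
        push_cast
        ring
      · rw [if_neg hke]
        dsimp only
        rw [if_neg (by omega : ¬ blocked + e > n0), ih _ _ _ _ _ (by omega)]
        push_cast
        ring

-- Degenerate case k = 0: both loops are the same running-sum scan, for any signs.
lemma goA_zero (rest : List Int) : ∀ (i nA n0 blocked : Int) (Ha T : List Int),
    nA = n0 - blocked → solutionGoA rest i nA 0 Ha = solutionGoB rest i n0 0 T blocked := by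
  induction rest with
  | nil => intros; simp [solutionGoA, solutionGoB]
  | cons e rest ih =>
    intro i nA n0 blocked Ha T hrel
    simp only [solutionGoA, solutionGoB]
    have h0 : (0 : Int) ≤ (T.length : Int) := Int.natCast_nonneg _
    rw [if_neg (by omega : ¬ (T.length : Int) < 0), if_neg (by simp : ¬ ((0:Int) < 0 ∧ T.headD 0 < e))]
    dsimp only
    by_cases hd : nA - e < 0
    · rw [if_pos hd]
      simp only [if_true]
      rw [if_pos (by omega : blocked + e > n0)]
    · rw [if_neg hd, if_neg (by omega : ¬ blocked + e > n0)]
      exact ih _ _ _ _ _ _ (by omega)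

-- Degenerate case: n ≥ 0 and at least as many invincibilities as positive enemies.
-- A pops a positive maximum at every deficit, so it never runs out and never returns early.
lemma goA_posk (rest : List Int) : ∀ (i nA kA : Int) (Ha : List Int),
    0 ≤ nA →
    ((Multiset.countP (fun x => 0 < x) (↑rest : Multiset Int) : Nat) : Int)
      + ((Multiset.countP (fun x => 0 < x) (negMS Ha) : Nat) : Int) ≤ kA →
    solutionGoA rest i nA kA Ha = i + rest.length := by
  induction rest with
  | nil => intros; simp [solutionGoA]
  | cons e rest ih =>
    intro i nA kA Ha hn hbud
    simp only [solutionGoA, List.length_cons]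
    have hcoe : (↑(e :: rest) : Multiset Int) = e ::ₘ ↑rest := by simp
    rw [hcoe, Multiset.countP_cons] at hbud
    have h0r : (0:Int) ≤ ((Multiset.countP (fun x => 0 < x) (↑rest : Multiset Int) : Nat) : Int) :=
      Int.natCast_nonneg _
    have h0H : (0:Int) ≤ ((Multiset.countP (fun x => 0 < x) (negMS Ha) : Nat) : Int) :=
      Int.natCast_nonneg _
    by_cases hd : nA - e < 0
    · have he : (0:Int) < e := by omega
      rw [if_pos he] at hbud
      rw [if_pos hd, if_neg (by push_cast at hbud; omega : ¬ kA = 0)]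
      obtain ⟨m, hm⟩ : ∃ m, PySem.List.min? ((-e) :: Ha) (fun x => x) = some m := by
        cases h : PySem.List.min? ((-e) :: Ha) (fun x => x) with
        | none => exact absurd ((PySem.List.min?_eq_none_iff _ _).mp h) (by simp)
        | some m => exact ⟨m, rfl⟩
      rw [hm]
      dsimp only
      have hmem := min?_neg_mem hm
      have htopm := min?_neg_top hm
      have hem : e ≤ -m := htopm e (by rw [negMS_cons]; exact Multiset.mem_cons_self e _)
      have hner := negMS_erase m ((-e) :: Ha)
      have hH1 : Multiset.countP (fun x => 0 < x) (negMS ((-e) :: Ha))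
          = Multiset.countP (fun x => 0 < x) (negMS (((-e) :: Ha).erase m)) + 1 := by
        rw [hner]
        conv_lhs => rw [← Multiset.cons_erase hmem]
        rw [Multiset.countP_cons, if_pos (by omega : (0:Int) < -m)]
      have hH2 : Multiset.countP (fun x => 0 < x) (negMS ((-e) :: Ha))
          = Multiset.countP (fun x => 0 < x) (negMS Ha) + 1 := by
        rw [negMS_cons, Multiset.countP_cons, if_pos he]
      rw [ih _ _ _ _ (by omega) (by push_cast at hbud ⊢; omega)]
      push_cast
      ring
    · rw [if_neg hd]
      have hH2 : Multiset.countP (fun x => 0 < x) (negMS ((-e) :: Ha))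
          = Multiset.countP (fun x => 0 < x) (negMS Ha) + (if (0:Int) < e then 1 else 0) := by
        rw [negMS_cons, Multiset.countP_cons]
      have hbud' : ((Multiset.countP (fun x => 0 < x) (↑rest : Multiset Int) : Nat) : Int)
          + ((Multiset.countP (fun x => 0 < x) (negMS ((-e) :: Ha)) : Nat) : Int) ≤ kA := by
        by_cases hp : (0:Int) < e
        · rw [if_pos hp] at hbud hH2
          push_cast at hbud ⊢
          omega
        · rw [if_neg hp] at hbud hH2
          push_cast at hbud ⊢
          omega
      rw [ih _ _ _ _ (by omega) hbud']
      push_cast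
      ring

-- B's blocked sum stays nonpositive: every blocked value is forced to be ≤ 0.
lemma goB_posk (rest : List Int) : ∀ (i n0 k0 blocked : Int) (T : List Int),
    List.Pairwise (· ≤ ·) T → blocked ≤ 0 → 0 ≤ n0 →
    ((Multiset.countP (fun x => 0 < x) (↑rest : Multiset Int) : Nat) : Int)
      + ((Multiset.countP (fun x => 0 < x) (↑T : Multiset Int) : Nat) : Int) ≤ k0 →
    solutionGoB rest i n0 k0 T blocked = i + rest.length := by
  induction rest with
  | nil => intros; simp [solutionGoB]
  | cons e rest ih =>
    intro i n0 k0 blocked T hsort hb hn hbud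
    simp only [solutionGoB, List.length_cons]
    have hcoe : (↑(e :: rest) : Multiset Int) = e ::ₘ ↑rest := by simp
    rw [hcoe, Multiset.countP_cons] at hbud
    have h0r : (0:Int) ≤ ((Multiset.countP (fun x => 0 < x) (↑rest : Multiset Int) : Nat) : Int) :=
      Int.natCast_nonneg _
    have h0T : (0:Int) ≤ ((Multiset.countP (fun x => 0 < x) (↑T : Multiset Int) : Nat) : Int) :=
      Int.natCast_nonneg _
    by_cases hlen : (T.length : Int) < k0
    · rw [if_pos hlen]
      dsimp only
      rw [if_neg (by omega : ¬ blocked > n0)]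
      have hbud' : ((Multiset.countP (fun x => 0 < x) (↑rest : Multiset Int) : Nat) : Int)
          + ((Multiset.countP (fun x => 0 < x)
              (↑(T.orderedInsert (· ≤ ·) e) : Multiset Int) : Nat) : Int) ≤ k0 := by
        rw [coe_orderedInsert, Multiset.countP_cons]
        by_cases hp : (0:Int) < e
        · rw [if_pos hp] at hbud ⊢
          push_cast at hbud ⊢
          omega
        · rw [if_neg hp] at hbud ⊢
          push_cast at hbud ⊢
          omega
      rw [ih _ _ _ _ _ (List.Pairwise.orderedInsert e T hsort) hb hn hbud']
      push_cast
      ring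
    · rw [if_neg hlen]
      have hlk : k0 ≤ (T.length : Int) := by omega
      by_cases hke : 0 < k0 ∧ T.headD 0 < e
      · obtain ⟨t0, T1, rfl⟩ : ∃ t0 T1, T = t0 :: T1 := by
          cases T with
          | nil => exfalso; simp at hlk; omega
          | cons t0 T1 => exact ⟨t0, T1, rfl⟩
        have ht0e : t0 < e := by simpa using hke.2
        have ht0T1 : ∀ t ∈ T1, t0 ≤ t := (List.pairwise_cons.mp hsort).1
        have hcT : (↑(t0 :: T1) : Multiset Int) = t0 ::ₘ ↑T1 := by simp
        have ht0neg : t0 ≤ 0 := by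
          by_cases hp : (0:Int) < e
          · by_contra hpos
            push_neg at hpos
            have hall : ∀ t ∈ (↑(t0 :: T1) : Multiset Int), 0 < t := by
              intro t ht
              rcases List.mem_cons.mp (Multiset.mem_coe.mp ht) with rfl | ht1
              · omega
              · have := ht0T1 t ht1; omega
            have hcard := Multiset.countP_eq_card.mpr hall
            rw [if_pos hp] at hbud
            rw [hcard] at hbud
            simp only [Multiset.coe_card] at hbud
            push_cast at hbud
            omega
          · omega
        rw [if_pos hke]
        simp only [List.headD_cons, List.tail_cons]
        rw [if_neg (by omega : ¬ blocked + t0 > n0)]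
        have hbud' : ((Multiset.countP (fun x => 0 < x) (↑rest : Multiset Int) : Nat) : Int)
            + ((Multiset.countP (fun x => 0 < x)
                (↑(T1.orderedInsert (· ≤ ·) e) : Multiset Int) : Nat) : Int) ≤ k0 := by
          have hT : Multiset.countP (fun x => 0 < x) (↑(t0 :: T1) : Multiset Int)
              = Multiset.countP (fun x => 0 < x) (↑T1 : Multiset Int) := by
            rw [hcT, Multiset.countP_cons, if_neg (by omega : ¬ (0:Int) < t0)]
            omega
          rw [coe_orderedInsert, Multiset.countP_cons]
          rw [hT] at hbud
          by_cases hp : (0:Int) < e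
          · rw [if_pos hp] at hbud ⊢
            push_cast at hbud ⊢
            omega
          · rw [if_neg hp] at hbud ⊢
            push_cast at hbud ⊢
            omega
        rw [ih _ _ _ _ _ (List.Pairwise.orderedInsert e T1 (List.pairwise_cons.mp hsort).2)
          (by omega) hn hbud']
        push_cast
        ring
      · have hee : e ≤ 0 := by
          by_contra hpos
          push_neg at hpos
          rw [if_pos hpos] at hbud
          by_cases hk0 : 0 < k0
          · obtain ⟨t0, T1, rfl⟩ : ∃ t0 T1, T = t0 :: T1 := by
              cases T with
              | nil => exfalso; simp at hlk; omega
              | cons t0 T1 => exact ⟨t0, T1, rfl⟩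
            have hht : ¬ t0 < e := fun h => hke ⟨hk0, by simpa using h⟩
            have ht0T1 : ∀ t ∈ T1, t0 ≤ t := (List.pairwise_cons.mp hsort).1
            have hall : ∀ t ∈ (↑(t0 :: T1) : Multiset Int), 0 < t := by
              intro t ht
              rcases List.mem_cons.mp (Multiset.mem_coe.mp ht) with rfl | ht1
              · omega
              · have := ht0T1 t ht1; omega
            have hcard := Multiset.countP_eq_card.mpr hall
            rw [hcard] at hbud
            simp only [Multiset.coe_card] at hbud
            push_cast at hbud
            omega
          · push_cast at hbud
            omega
        rw [if_neg hke]
        dsimp only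
        rw [if_neg (by omega : ¬ blocked + e > n0)]
        have hbud' : ((Multiset.countP (fun x => 0 < x) (↑rest : Multiset Int) : Nat) : Int)
            + ((Multiset.countP (fun x => 0 < x) (↑T : Multiset Int) : Nat) : Int) ≤ k0 := by
          rw [if_neg (by omega : ¬ (0:Int) < e)] at hbud
          omega
        rw [ih _ _ _ _ _ hsort (by omega) hn hbud']
        push_cast
        ring

-- ===== VERDICT (by name: the statement is the Claim_ definition above) =====
theorem solution_spec : Claim_equal_solution := by
  intro n k enemy _ hpre
  unfold Spec_solution solution solution_alt
  rcases hpre with ⟨hn, hk, henemy⟩ | hk0 | hnil | hrich | ⟨hn, hpos⟩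
  · apply goAB enemy 0 n k n k 0 [] [] 0 henemy
    refine ⟨List.Pairwise.nil, ?_, ?_, ?_, ?_, ?_, ?_, hn, ?_, ?_, ?_, hk, ?_⟩ <;>
      simp [negMS] <;> omega
  · subst hk0
    exact goA_zero enemy 0 n n 0 [] [] (by omega)
  · subst hnil
    simp [solutionGoA, solutionGoB]
  · rw [goA_rich enemy 0 n k [] hrich, goB_rich enemy 0 n k 0 [] (by omega)]
  · rw [goA_posk enemy 0 n k [] hn (by simpa [negMS] using hpos),
      goB_posk enemy 0 n k 0 [] List.Pairwise.nil le_rfl hn (by simpa using hpos)]
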